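-- pv_equiv track=rewrite | github.com/dchapp/ompt_testing | make_event_count_plots.py | get_counts_for_app
-- ===== SOURCE A (Python) =====
-- def get_counts_for_app(params_to_counts, thread_counts, app):
--     nthreads_to_counts = {}
--     callbacks = ["parallel_begin",
--                  "explicit_task",
--                  "implicit_task_creation",
--                  "implicit_task_completion",
--                  "task_dependences",
--                  "task_schedule_others",
--                  "task_schedule_cancel",
--                  "task_schedule_yield",
--                  "task_schedule_complete",
--                  "task_sync_region",
--                  "task_sync_region_wait"
--                 ]
--     for nt in thread_counts:
--         nthreads_to_counts[nt] = {}
--         for p in params_to_counts: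
--             if p[0] == nt and p[1] == app:
--                 for k in params_to_counts[p]:
--                     if k in callbacks:
--                         if k not in nthreads_to_counts[nt]:
--                             nthreads_to_counts[nt][k] = [ params_to_counts[p][k] ]
--                         else:
--                             nthreads_to_counts[nt][k].append( params_to_counts[p][k] )
--     return nthreads_to_counts
-- ===== SOURCE B (Python) =====
-- CALLBACKS = frozenset([
--     "parallel_begin",
--     "explicit_task",
--     "implicit_task_creation",
--     "implicit_task_completion",
--     "task_dependences",
--     "task_schedule_others",
--     "task_schedule_cancel",
--     "task_schedule_yield",
--     "task_schedule_complete",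
--     "task_sync_region",
--     "task_sync_region_wait",
-- ])
--
-- def get_counts_for_app(params_to_counts, thread_counts, app):
--     # Stage 1: flatten the matching entries into (nt, callback, count) triples in one pass.
--     triples = [(p[0], k, v)
--                for p, counts in params_to_counts.items() if p[1] == app
--                for k, v in counts.items() if k in CALLBACKS]
--     # Stage 2: group the triples by thread count, then by callback name.
--     by_nt = {}
--     for nt, k, v in triples:
--         by_nt.setdefault(nt, {}).setdefault(k, []).append(v)
--     # Stage 3: emit one bucket per distinct requested thread count, in order.
--     return {nt: by_nt.get(nt, {}) for nt in dict.fromkeys(thread_counts)}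
-- ===== Notes on version B (the rewrite author's own statement) =====
-- stated objective: faster
-- what changed: A rescans all of params_to_counts once per thread count; B is a staged pipeline: one pass flattens matching entries into (thread_count, callback, count) triples, a second pass groups them by thread count with setdefault, and the result is emitted per distinct requested thread count.
import Mathlib
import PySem

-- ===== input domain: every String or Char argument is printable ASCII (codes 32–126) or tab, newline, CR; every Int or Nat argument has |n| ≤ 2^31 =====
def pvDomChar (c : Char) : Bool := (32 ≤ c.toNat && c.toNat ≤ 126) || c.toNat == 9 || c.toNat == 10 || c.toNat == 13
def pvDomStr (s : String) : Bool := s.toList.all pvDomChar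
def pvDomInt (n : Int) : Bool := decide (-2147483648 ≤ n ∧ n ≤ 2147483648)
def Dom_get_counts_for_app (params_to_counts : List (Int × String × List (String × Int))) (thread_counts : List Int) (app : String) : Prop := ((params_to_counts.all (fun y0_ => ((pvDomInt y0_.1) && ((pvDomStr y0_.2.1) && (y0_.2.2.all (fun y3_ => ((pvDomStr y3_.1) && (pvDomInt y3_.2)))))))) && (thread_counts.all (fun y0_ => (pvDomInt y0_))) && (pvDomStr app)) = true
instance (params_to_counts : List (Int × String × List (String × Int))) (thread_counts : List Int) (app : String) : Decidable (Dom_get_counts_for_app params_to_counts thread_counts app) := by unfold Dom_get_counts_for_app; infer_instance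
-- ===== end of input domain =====

-- B replaces A's per-thread-count rescans by a staged pipeline: flatten matching entries into
-- (thread_count, callback, count) triples in one pass, group the triples, then emit one bucket
-- per distinct thread count (objective: faster, asymptotic).


-- ===== PORT A =====
def pvCallbacksA : List String :=
  ["parallel_begin", "explicit_task", "implicit_task_creation", "implicit_task_completion",
   "task_dependences", "task_schedule_others", "task_schedule_cancel", "task_schedule_yield",
   "task_schedule_complete", "task_sync_region", "task_sync_region_wait"]

def get_counts_for_app (params_to_counts : List (Int × String × List (String × Int))) (thread_counts : List Int) (app : String) : List (Int × List (String × List Int)) :=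
  let res : PySem.Dict Int (PySem.Dict String (List Int)) :=
    thread_counts.foldl (fun acc nt =>
      acc.insert nt (
        params_to_counts.foldl (fun d p =>
          if p.1 = nt ∧ p.2.1 = app then
            p.2.2.foldl (fun d kv =>
              if kv.1 ∈ pvCallbacksA then
                match d.get? kv.1 with
                | none => d.insert kv.1 [kv.2]
                | some l => d.insert kv.1 (l ++ [kv.2])
              else d) d
          else d) PySem.Dict.empty)) PySem.Dict.empty
  res.items.map (fun q => (q.1, q.2.items))

-- ===== PORT B =====
def pvCallbacksB : PySem.Set String :=
  PySem.Set.ofList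
    ["parallel_begin", "explicit_task", "implicit_task_creation", "implicit_task_completion",
     "task_dependences", "task_schedule_others", "task_schedule_cancel", "task_schedule_yield",
     "task_schedule_complete", "task_sync_region", "task_sync_region_wait"]

def get_counts_for_app_alt (params_to_counts : List (Int × String × List (String × Int))) (thread_counts : List Int) (app : String) : List (Int × List (String × List Int)) :=
  -- Stage 1: flatten the matching entries into (nt, callback, count) triples.
  let triples : List (Int × String × Int) :=
    params_to_counts.flatMap (fun p =>
      if p.2.1 = app then
        p.2.2.filterMap (fun kv =>
          if pvCallbacksB.contains kv.1 then some (p.1, kv.1, kv.2) else none)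
      else [])
  -- Stage 2: group the triples by thread count, then by callback name.
  let by_nt : PySem.Dict Int (PySem.Dict String (List Int)) :=
    triples.foldl (fun b t =>
      b.modify t.1 PySem.Dict.empty (fun d => d.modify t.2.1 [] (fun l => l ++ [t.2.2])))
      PySem.Dict.empty
  -- Stage 3: one bucket per distinct requested thread count, in order.
  (PySem.List.dedup thread_counts).map (fun nt => (nt, (by_nt.getD nt PySem.Dict.empty).items))

-- ===== PRECONDITION & SPEC =====
def Spec_get_counts_for_app (params_to_counts : List (Int × String × List (String × Int))) (thread_counts : List Int) (app : String) (out : List (Int × List (String × List Int))) : Prop := out = get_counts_for_app_alt params_to_counts thread_counts app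
instance (params_to_counts : List (Int × String × List (String × Int))) (thread_counts : List Int) (app : String) (out : List (Int × List (String × List Int))) : Decidable (Spec_get_counts_for_app params_to_counts thread_counts app out) := by unfold Spec_get_counts_for_app; infer_instance

-- ===== CLAIM (what is proved, stated in full; the proofs are below) =====
def Claim_equal_get_counts_for_app : Prop := ∀ (params_to_counts : List (Int × String × List (String × Int))) (thread_counts : List Int) (app : String), Dom_get_counts_for_app params_to_counts thread_counts app → Spec_get_counts_for_app params_to_counts thread_counts app (get_counts_for_app params_to_counts thread_counts app)

-- ===== LEMMAS AND PROOFS =====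

-- the common inner per-(key,count) update both programs perform
def pvInner (d : PySem.Dict String (List Int)) (kv : String × Int) : PySem.Dict String (List Int) :=
  if pvCallbacksB.contains kv.1 then d.modify kv.1 [] (fun l => l ++ [kv.2]) else d

-- A's inner per-entry update equals pvInner
theorem pvInner_eqA (d : PySem.Dict String (List Int)) (kv : String × Int) :
    (if kv.1 ∈ pvCallbacksA then
      match d.get? kv.1 with
      | none => d.insert kv.1 [kv.2]
      | some l => d.insert kv.1 (l ++ [kv.2])
     else d) = pvInner d kv := by
  unfold pvInner pvCallbacksB
  by_cases h : kv.1 ∈ pvCallbacksA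
  · rw [if_pos h, if_pos (by rw [PySem.Set.contains_eq_listContains]; simp only [List.contains_iff_mem, PySem.Set.mem_ofList]; exact h)]
    show _ = d.insert kv.1 (d.getD kv.1 [] ++ [kv.2])
    cases hg : d.get? kv.1 with
    | none => rw [PySem.Dict.getD_of_get?_eq_none d [] hg]; rfl
    | some l => rw [PySem.Dict.getD_of_get?_eq_some d [] hg]
  · rw [if_neg h, if_neg (by rw [PySem.Set.contains_eq_listContains]; simp only [List.contains_iff_mem, PySem.Set.mem_ofList]; exact h)]

-- A's per-thread-count scan of params, as a function of the thread count
def pvScan (params_to_counts : List (Int × String × List (String × Int))) (app : String) (nt : Int) : PySem.Dict String (List Int) :=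
  params_to_counts.foldl (fun d p => if p.1 = nt ∧ p.2.1 = app then p.2.2.foldl pvInner d else d) PySem.Dict.empty

theorem pv_contains_map (f : Int → PySem.Dict String (List Int)) (K : List Int) (nt : Int) :
    (PySem.Dict.mk (K.map (fun k => (k, f k)))).contains nt = decide (nt ∈ K) := by
  simp [PySem.Dict.contains_mk, List.any_map, Function.comp_def, List.any_beq']

theorem pv_insert_map (f : Int → PySem.Dict String (List Int)) (K : List Int) (nt : Int) :
    (PySem.Dict.mk (K.map (fun k => (k, f k)))).insert nt (f nt)
      = PySem.Dict.mk ((PySem.Set.add K nt).map (fun k => (k, f k))) := by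
  by_cases h : nt ∈ K
  · apply PySem.Dict.ext
    rw [PySem.Dict.items_insert_of_contains _ _ (by rw [pv_contains_map]; simpa using h)]
    rw [PySem.Set.add_of_mem h]
    simp only [List.map_map]
    apply List.map_congr_left
    intro k hk
    by_cases hkn : k = nt <;> simp [hkn]
  · apply PySem.Dict.ext
    rw [PySem.Dict.items_insert_of_not_contains _ _ (by rw [pv_contains_map]; simpa using h)]
    rw [PySem.Set.add_of_not_mem h]
    simp

-- A's outer loop keeps the shape 'one entry per distinct thread count seen so far'
theorem pvFoldl_insert_shape (f : Int → PySem.Dict String (List Int)) (tcs : List Int) :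
    ∀ (K : List Int),
    tcs.foldl (fun acc nt => acc.insert nt (f nt)) (PySem.Dict.mk (K.map (fun k => (k, f k))))
      = PySem.Dict.mk ((PySem.Set.update K tcs).map (fun k => (k, f k))) := by
  induction tcs with
  | nil => intro K; rfl
  | cons nt tcs ih =>
    intro K
    rw [List.foldl_cons, pv_insert_map f K nt]
    exact ih (PySem.Set.add K nt)

-- B's grouping pass, projected onto one thread-count bucket, is a fold over that bucket's triples
theorem pvBucket (ts : List (Int × String × Int)) :
    ∀ (b : PySem.Dict Int (PySem.Dict String (List Int))) (nt : Int),
    (ts.foldl (fun b t =>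
        b.modify t.1 PySem.Dict.empty (fun d => d.modify t.2.1 [] (fun l => l ++ [t.2.2]))) b).getD nt PySem.Dict.empty
      = (ts.filter (fun t => t.1 == nt)).foldl
          (fun d t => d.modify t.2.1 [] (fun l => l ++ [t.2.2])) (b.getD nt PySem.Dict.empty) := by
  induction ts with
  | nil => intro b nt; rfl
  | cons t ts ih =>
    intro b nt
    rw [List.foldl_cons, ih]
    by_cases h : t.1 = nt
    · simp [h, PySem.Dict.getD_modify_self]
    · simp [h, PySem.Dict.getD_modify, Ne.symm h]

-- one param entry's contribution to bucket nt
theorem pvPer (xs : List (String × Int)) (c nt : Int) :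
    ∀ (d : PySem.Dict String (List Int)),
    ((xs.filterMap (fun kv =>
        if pvCallbacksB.contains kv.1 then some (c, kv.1, kv.2) else none)).filter
        (fun t => t.1 == nt)).foldl (fun d t => d.modify t.2.1 [] (fun l => l ++ [t.2.2])) d
      = if c = nt then xs.foldl pvInner d else d := by
  induction xs with
  | nil => intro d; by_cases h : c = nt <;> simp [h]
  | cons kv xs ih =>
    intro d
    rw [List.filterMap_cons]
    by_cases hc : pvCallbacksB.contains kv.1
    · rw [if_pos hc, List.filter_cons]
      by_cases h : c = nt
      · rw [if_pos (by simpa using h), List.foldl_cons, ih, if_pos h, if_pos h, List.foldl_cons]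
        have hstep : pvInner d kv = d.modify kv.1 [] (fun l => l ++ [kv.2]) := by
          unfold pvInner; rw [if_pos hc]
        rw [hstep]
      · rw [if_neg (by simpa using h), ih, if_neg h, if_neg h]
    · rw [if_neg hc, ih]
      by_cases h : c = nt
      · rw [if_pos h, if_pos h, List.foldl_cons]
        have hstep : pvInner d kv = d := by unfold pvInner; rw [if_neg hc]
        rw [hstep]
      · rw [if_neg h, if_neg h]

-- the filtered triples of bucket nt, folded, reproduce A's per-thread-count scan
theorem pvTriples (app : String) (nt : Int) (ptc : List (Int × String × List (String × Int))) :
    ∀ (d : PySem.Dict String (List Int)),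
    ((ptc.flatMap (fun p =>
        if p.2.1 = app then
          p.2.2.filterMap (fun kv =>
            if pvCallbacksB.contains kv.1 then some (p.1, kv.1, kv.2) else none)
        else [])).filter (fun t => t.1 == nt)).foldl
        (fun d t => d.modify t.2.1 [] (fun l => l ++ [t.2.2])) d
      = ptc.foldl (fun d p => if p.1 = nt ∧ p.2.1 = app then p.2.2.foldl pvInner d else d) d := by
  induction ptc with
  | nil => intro d; rfl
  | cons p ps ih =>
    intro d
    rw [List.flatMap_cons, List.filter_append, List.foldl_append, ih, List.foldl_cons]
    congr 1
    by_cases ha : p.2.1 = app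
    · rw [if_pos ha, pvPer]
      by_cases h : p.1 = nt
      · rw [if_pos h, if_pos ⟨h, ha⟩]
      · rw [if_neg h, if_neg (by tauto)]
    · rw [if_neg ha, if_neg (by tauto)]
      rfl

-- ===== VERDICT (by name: the statement is the Claim_ definition above) =====
theorem get_counts_for_app_spec : Claim_equal_get_counts_for_app := by
  intro ptc tcs app _
  unfold Spec_get_counts_for_app get_counts_for_app get_counts_for_app_alt
  have hfunA : (fun (d : PySem.Dict String (List Int)) (kv : String × Int) =>
      if kv.1 ∈ pvCallbacksA then
        match d.get? kv.1 with
        | none => d.insert kv.1 [kv.2]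
        | some l => d.insert kv.1 (l ++ [kv.2])
      else d) = pvInner := funext fun d => funext fun kv => pvInner_eqA d kv
  simp only [hfunA]
  have eA : tcs.foldl (fun acc nt => acc.insert nt (pvScan ptc app nt)) PySem.Dict.empty
      = PySem.Dict.mk ((PySem.Set.update ([] : List Int) tcs).map (fun k => (k, pvScan ptc app k))) :=
    pvFoldl_insert_shape (pvScan ptc app) tcs []
  simp only [pvScan] at eA
  rw [eA]
  have hK : PySem.List.dedup tcs = PySem.Set.update ([] : List Int) tcs := by
    rw [PySem.List.dedup_eq_ofList]; rfl
  rw [hK]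
  show ((PySem.Set.update ([] : List Int) tcs).map
      (fun k => (k, ptc.foldl (fun d p => if p.1 = k ∧ p.2.1 = app then p.2.2.foldl pvInner d else d) PySem.Dict.empty))).map
      (fun q => (q.1, q.2.items)) = _
  rw [List.map_map]
  apply List.map_congr_left
  intro k _
  simp only [Function.comp_def]
  rw [pvBucket, pvTriples]
  rfl
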